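-- pv_equiv track=rewrite | github.com/gembytram/UTE_KLTN | database.py | _rewrite_qmark_placeholders
-- ===== SOURCE A (Python) =====
-- def _rewrite_qmark_placeholders(sql):
--     out = []
--     in_single = False
--     in_double = False
--     i = 0
--     while i < len(sql):
--         ch = sql[i]
--         if ch == "'" and not in_double:
--             if in_single and i + 1 < len(sql) and sql[i + 1] == "'":
--                 out.append("''")
--                 i += 2
--                 continue
--             in_single = not in_single
--             out.append(ch)
--             i += 1
--             continue
--         if ch == '"' and not in_single:
--             in_double = not in_double
--             out.append(ch)
--             i += 1
--             continue
--         if ch == "?" and not in_single and not in_double: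
--             out.append("%s")
--             i += 1
--             continue
--         out.append(ch)
--         i += 1
--     return "".join(out)
-- ===== SOURCE B (Python) =====
-- def _rewrite_qmark_placeholders(sql):
--     # Span tokenizer: copies each quoted literal through in one slice instead of
--     # tracking in_single/in_double flags per character; '?' outside quotes -> '%s'.
--     n = len(sql)
--     out = []
--     i = 0
--     while i < n:
--         ch = sql[i]
--         if ch == "'":
--             j = i + 1
--             while j < n:
--                 if sql[j] != "'":
--                     j += 1
--                 elif j + 1 < n and sql[j + 1] == "'":
--                     j += 2
--                 else:
--                     j += 1
--                     break
--             out.append(sql[i:j])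
--             i = j
--         elif ch == '"':
--             j = i + 1
--             while j < n and sql[j] != '"':
--                 j += 1
--             if j < n:
--                 j += 1
--             out.append(sql[i:j])
--             i = j
--         elif ch == "?":
--             out.append("%s")
--             i += 1
--         else:
--             out.append(ch)
--             i += 1
--     return "".join(out)
-- ===== Notes on version B (the rewrite author's own statement) =====
-- stated objective: alternative
-- what changed: Replaces A's per-character scanner with in_single/in_double state flags by a span tokenizer that, on a quote, consumes the whole quoted literal (with doubled-quote escapes and an optional unterminated end) as one slice and copies it through, rewriting question-mark placeholders only in the unquoted stretches.
import Mathlib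
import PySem

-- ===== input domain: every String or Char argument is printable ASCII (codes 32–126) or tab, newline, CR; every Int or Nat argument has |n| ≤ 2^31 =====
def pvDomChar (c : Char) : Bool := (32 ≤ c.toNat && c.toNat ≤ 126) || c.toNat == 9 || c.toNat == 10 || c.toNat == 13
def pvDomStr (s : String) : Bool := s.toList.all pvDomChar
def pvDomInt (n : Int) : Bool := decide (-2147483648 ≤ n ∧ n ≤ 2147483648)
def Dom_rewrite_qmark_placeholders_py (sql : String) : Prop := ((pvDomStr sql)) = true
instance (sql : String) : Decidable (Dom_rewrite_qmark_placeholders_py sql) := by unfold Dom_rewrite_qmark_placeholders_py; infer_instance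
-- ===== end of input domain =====

-- B replaces A's per-character in_single/in_double state machine by a span tokenizer
-- that copies each quoted literal through whole (objective: simpler/alternative; return value only).

-- ===== PORT A =====
-- A's while loop over indices with flags in_single/in_double, transliterated as
-- recursion over the remaining characters carrying the same two flags; the
-- lookahead `i + 1 < len(sql) and sql[i+1] == "'"` is `rest.head? = some '\''`.
def pvAGo (in_single in_double : Bool) : List Char → List Char
  | [] => []
  | ch :: rest =>
    if ch == '\'' && !in_double then
      if in_single && (rest.head? == some '\'') then
        '\'' :: '\'' :: pvAGo in_single in_double rest.tail
      else
        '\'' :: pvAGo (!in_single) in_double rest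
    else if ch == '"' && !in_single then
      '"' :: pvAGo in_single (!in_double) rest
    else if ch == '?' && !in_single && !in_double then
      '%' :: 's' :: pvAGo in_single in_double rest
    else
      ch :: pvAGo in_single in_double rest
termination_by l => l.length
decreasing_by all_goals (simp [List.length_tail]; try omega)

def rewrite_qmark_placeholders_py (sql : String) : String :=
  String.ofList (pvAGo false false sql.toList)

-- ===== PORT B =====
-- Source B's inner while over j scanning a single-quoted span (with '' escapes and an
-- optional unterminated end) becomes pvBSingle: (span after the opening quote, rest).
def pvBSingle : List Char → List Char × List Char
  | [] => ([], [])
  | c :: rest =>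
    if c == '\'' then
      if rest.head? == some '\'' then
        let p := pvBSingle rest.tail; ('\'' :: '\'' :: p.1, p.2)
      else (['\''], rest)
    else
      let p := pvBSingle rest; (c :: p.1, p.2)
termination_by l => l.length
decreasing_by all_goals (simp [List.length_tail]; try omega)

-- Source B's scan to the closing double quote (kept if present).
def pvBDouble : List Char → List Char × List Char
  | [] => ([], [])
  | c :: rest =>
    if c == '"' then (['"'], rest)
    else let p := pvBDouble rest; (c :: p.1, p.2)

theorem pvBSingle_len (l : List Char) : (pvBSingle l).2.length ≤ l.length := by
  induction l using pvBSingle.induct with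
  | case1 => simp [pvBSingle]
  | case2 c rest h hh ih =>
      have ht : rest.tail.length ≤ rest.length := by simp [List.length_tail]
      simp [pvBSingle, h, hh]; omega
  | case3 c rest h hh =>
      simp [pvBSingle, h, hh]
  | case4 c rest h ih =>
      simp [pvBSingle, h]; omega

theorem pvBDouble_len (l : List Char) : (pvBDouble l).2.length ≤ l.length := by
  induction l with
  | nil => simp [pvBDouble]
  | cons c rest ih =>
      by_cases h : c == '"' <;> simp [pvBDouble, h] <;> omega

-- Source B's outer while: dispatch on the first character, consuming whole spans.
def pvBGo : List Char → List Char
  | [] => []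
  | c :: rest =>
    if c == '\'' then
      let p := pvBSingle rest
      '\'' :: (p.1 ++ pvBGo p.2)
    else if c == '"' then
      let p := pvBDouble rest
      '"' :: (p.1 ++ pvBGo p.2)
    else if c == '?' then
      '%' :: 's' :: pvBGo rest
    else
      c :: pvBGo rest
termination_by l => l.length
decreasing_by
  · exact Nat.lt_succ_of_le (pvBSingle_len rest)
  · exact Nat.lt_succ_of_le (pvBDouble_len rest)
  · simp
  · simp

def rewrite_qmark_placeholders_py_alt (sql : String) : String :=
  String.ofList (pvBGo sql.toList)

-- ===== PRECONDITION & SPEC =====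
def Spec_rewrite_qmark_placeholders_py (sql : String) (out : String) : Prop := out = rewrite_qmark_placeholders_py_alt sql
instance (sql : String) (out : String) : Decidable (Spec_rewrite_qmark_placeholders_py sql out) := by unfold Spec_rewrite_qmark_placeholders_py; infer_instance

-- ===== CLAIM (what is proved, stated in full; the proofs are below) =====
def Claim_equal_rewrite_qmark_placeholders_py : Prop := ∀ (sql : String), Dom_rewrite_qmark_placeholders_py sql → Spec_rewrite_qmark_placeholders_py sql (rewrite_qmark_placeholders_py sql)

-- ===== LEMMAS AND PROOFS =====

-- Inside a single-quoted literal, A copies characters (handling '' escapes and the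
-- closing quote) until the literal ends: exactly the span pvBSingle isolates.
theorem pvA_single (l : List Char) :
    pvAGo true false l = (pvBSingle l).1 ++ pvAGo false false (pvBSingle l).2 := by
  induction l using pvBSingle.induct with
  | case1 => simp [pvAGo, pvBSingle]
  | case2 c rest h hh ih =>
      have hc : c = '\'' := by simpa using h
      subst hc
      simp [pvAGo, pvBSingle, hh, ih]
  | case3 c rest h hh =>
      have hc : c = '\'' := by simpa using h
      subst hc
      simp [pvAGo, pvBSingle, hh]
  | case4 c rest h ih =>
      -- with in_single = true every non-quote character is just copied by A
      simp [pvAGo, pvBSingle, h, ih]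

-- Inside a double-quoted literal, A copies characters until the closing quote:
-- exactly the span pvBDouble isolates.
theorem pvA_double (l : List Char) :
    pvAGo false true l = (pvBDouble l).1 ++ pvAGo false false (pvBDouble l).2 := by
  induction l with
  | nil => simp [pvAGo, pvBDouble]
  | cons c rest ih =>
      by_cases hd : c = '"'
      · subst hd; simp [pvAGo, pvBDouble]
      · simp [pvAGo, pvBDouble, hd, ih]

-- Outside quotes the two scanners agree step by step, quoted spans being bridged
-- by pvA_single / pvA_double.
theorem pvAB (l : List Char) : pvAGo false false l = pvBGo l := by
  induction l using pvBGo.induct with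
  | case1 => simp [pvAGo, pvBGo]
  | case2 c rest h p ih =>
      have hc : c = '\'' := by simpa using h
      subst hc
      simp [pvBGo, pvAGo, pvA_single]
      exact ih
  | case3 c rest h hd p ih =>
      have hc : c = '"' := by simpa using hd
      subst hc
      simp [pvBGo, pvAGo, pvA_double, h]
      exact ih
  | case4 c rest h hd hq ih =>
      have hc : c = '?' := by simpa using hq
      subst hc
      simp [pvBGo, pvAGo, h, hd, ih]
  | case5 c rest h hd hq ih =>
      simp [pvBGo, pvAGo, h, hd, hq, ih]

-- ===== VERDICT (by name: the statement is the Claim_ definition above) =====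
theorem rewrite_qmark_placeholders_py_spec : Claim_equal_rewrite_qmark_placeholders_py := by
  intro sql _
  unfold Spec_rewrite_qmark_placeholders_py rewrite_qmark_placeholders_py rewrite_qmark_placeholders_py_alt
  rw [pvAB]
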